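-- pv_equiv track=rewrite | github.com/ash-scaleai/cartography | cartography/intel/util/pagination.py | rebatch
-- ===== SOURCE A (Python) =====
-- from typing import Any
-- from typing import Dict
-- from typing import Generator
-- from typing import List
--
-- def rebatch(
--     pages: Generator[List[Dict[str, Any]], None, None],
--     batch_size: int,
-- ) -> Generator[List[Dict[str, Any]], None, None]:
--     """
--     Re-chunk an iterable of variable-size pages into uniform batches.
--
--     API pages are often not a consistent size.  This helper consumes them and
--     yields lists of exactly *batch_size* records (the last batch may be
--     smaller).
--
--     :param pages: A generator that yields ``List[Dict]`` pages.
--     :param batch_size: The desired number of records per output batch.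
--     :yields: Uniformly-sized ``List[Dict]`` batches.
--     """
--     if batch_size <= 0:
--         raise ValueError(f"batch_size must be greater than 0, got {batch_size}")
--
--     buffer: List[Dict[str, Any]] = []
--
--     for page in pages:
--         buffer.extend(page)
--         while len(buffer) >= batch_size:
--             yield buffer[:batch_size]
--             buffer = buffer[batch_size:]
--
--     if buffer:
--         yield buffer
-- ===== SOURCE B (Python) =====
-- from typing import Any
-- from typing import Dict
-- from typing import Generator
-- from typing import List
--
--
-- def rebatch(
--     pages: Generator[List[Dict[str, Any]], None, None],
--     batch_size: int,
-- ) -> Generator[List[Dict[str, Any]], None, None]: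
--     if batch_size <= 0:
--         raise ValueError(f"batch_size must be greater than 0, got {batch_size}")
--
--     flat = [record for page in pages for record in page]
--     while flat:
--         yield flat[:batch_size]
--         flat = flat[batch_size:]
-- ===== Notes on version B (the rewrite author's own statement) =====
-- stated objective: simpler
-- what changed: Replaces A's per-page buffer with extend + inner while-loop re-slicing and a trailing conditional yield by a single eager flatten followed by one plain chunking loop over the flat list.
import Mathlib
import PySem

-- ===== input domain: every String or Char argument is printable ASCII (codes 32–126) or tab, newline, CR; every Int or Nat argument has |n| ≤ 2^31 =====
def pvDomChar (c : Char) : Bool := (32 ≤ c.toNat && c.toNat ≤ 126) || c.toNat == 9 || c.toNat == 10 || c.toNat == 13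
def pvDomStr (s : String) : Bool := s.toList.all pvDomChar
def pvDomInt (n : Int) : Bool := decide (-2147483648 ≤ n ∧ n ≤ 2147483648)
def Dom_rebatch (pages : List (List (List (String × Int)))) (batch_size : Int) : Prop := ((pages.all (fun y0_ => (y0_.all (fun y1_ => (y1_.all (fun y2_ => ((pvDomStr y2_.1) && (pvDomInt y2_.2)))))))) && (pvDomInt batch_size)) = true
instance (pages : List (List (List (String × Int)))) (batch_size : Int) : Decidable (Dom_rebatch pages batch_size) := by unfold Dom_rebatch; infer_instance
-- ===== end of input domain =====

-- B replaces A's per-page buffer (extend + while-loop re-slicing + trailing yield) by one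
-- eager flatten followed by a single take/drop chunking loop; return-value equivalence only
-- (both Pythons are generators; Pre_ excludes batch_size <= 0, where A raises ValueError).


-- ===== PORT A =====
-- A's inner `while len(buffer) >= batch_size` loop; batch size is m+1 (m = batch_size-1,
-- a totality encoding: the successor form gives the termination measure).
def rebatchDrain (m : Nat) (buf : List (List (String × Int))) :
    List (List (List (String × Int))) × List (List (String × Int)) :=
  if h : m + 1 ≤ buf.length then
    let d := rebatchDrain m (buf.drop (m + 1))
    (buf.take (m + 1) :: d.1, d.2)
  else ([], buf)
termination_by buf.length
decreasing_by simp [List.length_drop]; omega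

def rebatch (pages : List (List (List (String × Int)))) (batch_size : Int) : List (List (List (String × Int))) :=
  if batch_size ≤ 0 then []   -- Python raises ValueError here; excluded by Pre_rebatch
  else
    let m := (batch_size - 1).toNat
    let st := pages.foldl
      (fun (st : List (List (List (String × Int))) × List (List (String × Int))) page =>
        let buf := st.2 ++ page          -- buffer.extend(page)
        let d := rebatchDrain m buf      -- while len(buffer) >= batch_size: yield …
        (st.1 ++ d.1, d.2)) ([], [])
    if st.2.isEmpty then st.1 else st.1 ++ [st.2]   -- if buffer: yield buffer

-- ===== PORT B =====
-- B's `while flat: yield flat[:batch_size]; flat = flat[batch_size:]`; same m+1 encoding.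
def rebatchChunks (m : Nat) : List (List (String × Int)) → List (List (List (String × Int)))
  | [] => []
  | x :: xs => ((x :: xs).take (m + 1)) :: rebatchChunks m ((x :: xs).drop (m + 1))
termination_by l => l.length
decreasing_by simp

def rebatch_alt (pages : List (List (List (String × Int)))) (batch_size : Int) : List (List (List (String × Int))) :=
  if batch_size ≤ 0 then []   -- Python raises ValueError here; excluded by Pre_rebatch
  else rebatchChunks ((batch_size - 1).toNat) pages.flatten

-- ===== PRECONDITION & SPEC =====
-- Pre_ excludes exactly batch_size <= 0, where A raises ValueError.
def Pre_rebatch (pages : List (List (List (String × Int)))) (batch_size : Int) : Prop := 0 < batch_size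
instance (pages : List (List (List (String × Int)))) (batch_size : Int) : Decidable (Pre_rebatch pages batch_size) := by unfold Pre_rebatch; infer_instance
def pvWitness_rebatch : (List (List (List (String × Int)))) × Int := ([[[("a", 1)], [("b", 2)]], [[("c", 3)]]], 2)
def Spec_rebatch (pages : List (List (List (String × Int)))) (batch_size : Int) (out : List (List (List (String × Int)))) : Prop := out = rebatch_alt pages batch_size
instance (pages : List (List (List (String × Int)))) (batch_size : Int) (out : List (List (List (String × Int)))) : Decidable (Spec_rebatch pages batch_size out) := by unfold Spec_rebatch; infer_instance

-- ===== CLAIM (what is proved, stated in full; the proofs are below) =====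
def Claim_equal_rebatch : Prop := ∀ (pages : List (List (List (String × Int)))) (batch_size : Int), Dom_rebatch pages batch_size → Pre_rebatch pages batch_size → Spec_rebatch pages batch_size (rebatch pages batch_size)

-- ===== LEMMAS AND PROOFS =====

-- draining full chunks off the front of the buffer commutes with chunking the whole stream
theorem drain_chunks_append (m : Nat) (buf rest : List (List (String × Int))) :
    (rebatchDrain m buf).1 ++ rebatchChunks m ((rebatchDrain m buf).2 ++ rest)
      = rebatchChunks m (buf ++ rest) := by
  induction buf using rebatchDrain.induct m with
  | case1 buf h ih =>
    have hne : buf ++ rest ≠ [] := by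
      intro hnil
      have : buf = [] := by simpa using (List.append_eq_nil_iff.mp hnil).1
      simp [this] at h
    obtain ⟨x, xs, hx⟩ := List.exists_cons_of_ne_nil hne
    rw [rebatchDrain]
    simp only [dif_pos h]
    rw [hx, rebatchChunks, ← hx]
    rw [List.take_append_of_le_length h, List.drop_append_of_le_length h]
    simpa using ih
  | case2 buf h =>
    rw [rebatchDrain, dif_neg h]
    simp

-- the leftover buffer after draining is shorter than the batch size
theorem drain_short (m : Nat) (buf : List (List (String × Int))) :
    (rebatchDrain m buf).2.length ≤ m := by
  induction buf using rebatchDrain.induct m with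
  | case1 buf h ih => rw [rebatchDrain, dif_pos h]; simpa using ih
  | case2 buf h => rw [rebatchDrain, dif_neg h]; simp only; omega

-- loop invariant of A's fold over pages
theorem fold_invariant (m : Nat) (pages : List (List (List (String × Int))))
    (o : List (List (List (String × Int)))) (b : List (List (String × Int))) :
    (pages.foldl
      (fun (st : List (List (List (String × Int))) × List (List (String × Int))) page =>
        let buf := st.2 ++ page
        let d := rebatchDrain m buf
        (st.1 ++ d.1, d.2)) (o, b)).1
      ++ rebatchChunks m (pages.foldl
      (fun (st : List (List (List (String × Int))) × List (List (String × Int))) page =>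
        let buf := st.2 ++ page
        let d := rebatchDrain m buf
        (st.1 ++ d.1, d.2)) (o, b)).2
      = o ++ rebatchChunks m (b ++ pages.flatten) := by
  induction pages generalizing o b with
  | nil => simp
  | cons p ps ih =>
    simp only [List.foldl_cons, List.flatten_cons]
    rw [ih]
    rw [List.append_assoc, drain_chunks_append m (b ++ p) ps.flatten]
    simp

-- a nonempty buffer shorter than the batch size chunks to itself
theorem chunks_of_short (m : Nat) (b : List (List (String × Int)))
    (hne : b ≠ []) (hlen : b.length ≤ m) :
    rebatchChunks m b = [b] := by
  obtain ⟨x, xs, rfl⟩ := List.exists_cons_of_ne_nil hne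
  have hlen' : (x :: xs).length ≤ m + 1 := Nat.le_succ_of_le hlen
  rw [rebatchChunks, List.take_of_length_le hlen', List.drop_eq_nil_of_le hlen', rebatchChunks]

-- the final buffer of A's fold is a drain result (or the initial empty buffer), hence short
theorem fold_buf_short (m : Nat) (pages : List (List (List (String × Int))))
    (o : List (List (List (String × Int)))) (b : List (List (String × Int))) (hb : b.length ≤ m) :
    (pages.foldl
      (fun (st : List (List (List (String × Int))) × List (List (String × Int))) page =>
        let buf := st.2 ++ page
        let d := rebatchDrain m buf
        (st.1 ++ d.1, d.2)) (o, b)).2.length ≤ m := by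
  induction pages generalizing o b with
  | nil => simpa
  | cons p ps ih => exact ih _ _ (drain_short m (b ++ p))

-- ===== VERDICT (by name: the statement is the Claim_ definition above) =====
theorem rebatch_spec : Claim_equal_rebatch := by
  intro pages batch_size _ hpre
  have hbs : ¬ batch_size ≤ 0 := by exact not_le.mpr hpre
  unfold Spec_rebatch rebatch rebatch_alt
  simp only [if_neg hbs]
  set m := (batch_size - 1).toNat with hm
  have hinv := fold_invariant m pages [] []
  have hshort := fold_buf_short m pages [] [] (by simp)
  simp only [List.nil_append] at hinv
  set st := pages.foldl
      (fun (st : List (List (List (String × Int))) × List (List (String × Int))) page =>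
        let buf := st.2 ++ page
        let d := rebatchDrain m buf
        (st.1 ++ d.1, d.2)) (([] : List (List (List (String × Int)))), ([] : List (List (String × Int)))) with hst
  by_cases hB : st.2 = []
  · simp only [hB, List.isEmpty_nil, if_pos] at *
    simpa [rebatchChunks, hB] using hinv
  · rw [if_neg (by simpa using hB)]
    rw [chunks_of_short m st.2 hB hshort] at hinv
    exact hinv
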